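-- pv_equiv track=rewrite | github.com/epearcecrump/symmetricNNs | nn/lib/setpartitions.py | mat_indices_list
-- ===== SOURCE A (Python) =====
-- def convert_tuple_to_matrix_index(indices: tuple, dim: int, order_k: int) -> int:
--     """
--     Helper function that converts a tuple with indices
--     (i_1, ..., i_k) where i_j is an element of {1, ..., dim}
--     that indexes a tensor to the equivalent index that indexes
--     the same tensor represented in matrix form.
--
--     Returns
--     -------
--     int
--     """
--     assert(len(indices) == order_k)
--     total = 0
--     for index in indices:
--         total += pow(dim, order_k - 1)*(index - 1)
--         order_k -=1
--     return total
--
-- def mat_indices_list(indices_lst: list, dim: int, order_k: int, order_l: int) -> list: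
--     """
--     Converts a list of tuple indices corresponding to a set partition,
--     for a given dim and orders k,l into their equivalent matrix index form.
--
--     Returns
--     -------
--     list
--     """
--
--     assert(len(indices_lst[0]) == order_k + order_l)
--
--     lst = []
--     for indices in indices_lst:
--         row_indices = indices[:order_l]
--         col_indices = indices[order_l:]
--         row_index = convert_tuple_to_matrix_index(row_indices, dim, order_l)
--         col_index = convert_tuple_to_matrix_index(col_indices, dim, order_k)
--         lst.append([row_index, col_index])
--     return lst
-- ===== SOURCE B (Python) =====
-- def _horner(digits, dim):
--     acc = 0
--     for d in digits:
--         acc = acc * dim + (d - 1)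
--     return acc
--
-- def mat_indices_list(indices_lst: list, dim: int, order_k: int, order_l: int) -> list:
--     assert(len(indices_lst[0]) == order_k + order_l)
--     return [[_horner(t[:order_l], dim), _horner(t[order_l:], dim)]
--             for t in indices_lst]
-- ===== Notes on version B (the rewrite author's own statement) =====
-- stated objective: simpler
-- what changed: Replaces the per-position pow(dim, exponent) weight computation (helper with a decrementing exponent counter) by a single Horner-scheme accumulator acc = acc*dim + (digit-1) over each row/col digit slice, built as a list comprehension.
import Mathlib
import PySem

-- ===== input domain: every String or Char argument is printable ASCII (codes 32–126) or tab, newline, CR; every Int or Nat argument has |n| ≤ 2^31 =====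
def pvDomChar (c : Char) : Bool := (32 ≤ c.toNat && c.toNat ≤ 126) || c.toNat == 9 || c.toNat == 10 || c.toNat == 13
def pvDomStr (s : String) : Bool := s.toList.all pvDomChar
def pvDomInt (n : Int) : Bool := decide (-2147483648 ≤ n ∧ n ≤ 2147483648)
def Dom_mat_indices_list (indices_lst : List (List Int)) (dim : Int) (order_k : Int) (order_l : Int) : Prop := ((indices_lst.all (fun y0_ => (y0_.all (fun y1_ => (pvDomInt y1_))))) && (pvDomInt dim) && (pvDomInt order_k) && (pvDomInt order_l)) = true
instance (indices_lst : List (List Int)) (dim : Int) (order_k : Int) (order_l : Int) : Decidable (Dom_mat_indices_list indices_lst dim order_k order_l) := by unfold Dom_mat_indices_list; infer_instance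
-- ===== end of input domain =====

-- B replaces A's per-digit pow(dim, exponent) helper by a Horner-scheme accumulator (objective: simpler).

-- ===== PORT A =====
-- helper: loop 'total += pow(dim, order_k-1)*(index-1); order_k -= 1'.  Inside Pre_ the assert
-- 'len(indices) == order_k' holds, so the exponent order_k-1 is never negative; the port uses .toNat
-- for the Nat exponent, exact on every input Pre_ admits (outside Pre_ Python raises).
def convert_tuple_to_matrix_index (indices : List Int) (dim : Int) (order_k : Int) : Int :=
  (indices.foldl
    (fun (s : Int × Int) index => (s.1 + dim ^ (s.2 - 1).toNat * (index - 1), s.2 - 1))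
    (0, order_k)).1

def mat_indices_list (indices_lst : List (List Int)) (dim : Int) (order_k : Int) (order_l : Int) : List (List Int) :=
  indices_lst.foldl
    (fun lst indices =>
      lst ++ [[convert_tuple_to_matrix_index (PySem.List.slice indices none (some order_l)) dim order_l,
               convert_tuple_to_matrix_index (PySem.List.slice indices (some order_l) none) dim order_k]])
    []

-- ===== PORT B =====
def hornerAcc (digits : List Int) (dim : Int) : Int :=
  digits.foldl (fun acc d => acc * dim + (d - 1)) 0

def mat_indices_list_alt (indices_lst : List (List Int)) (dim : Int) (order_k : Int) (order_l : Int) : List (List Int) :=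
  indices_lst.map (fun t =>
    [hornerAcc (PySem.List.slice t none (some order_l)) dim,
     hornerAcc (PySem.List.slice t (some order_l) none) dim])

-- ===== PRECONDITION & SPEC =====
-- Pre_ excludes exactly the inputs where Python A raises: an empty list (IndexError on
-- indices_lst[0]), negative orders, or a row whose length is not order_l + order_k (AssertionError).
def Pre_mat_indices_list (indices_lst : List (List Int)) (dim : Int) (order_k : Int) (order_l : Int) : Prop :=
  indices_lst ≠ [] ∧ 0 ≤ order_k ∧ 0 ≤ order_l ∧
    ∀ row ∈ indices_lst, (row.length : Int) = order_l + order_k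
instance (indices_lst : List (List Int)) (dim : Int) (order_k : Int) (order_l : Int) : Decidable (Pre_mat_indices_list indices_lst dim order_k order_l) := by unfold Pre_mat_indices_list; infer_instance

def pvWitness_mat_indices_list : List (List Int) × Int × Int × Int := ([[1, 2, 3], [2, 2, 1]], 3, 2, 1)

def Spec_mat_indices_list (indices_lst : List (List Int)) (dim : Int) (order_k : Int) (order_l : Int) (out : List (List Int)) : Prop := out = mat_indices_list_alt indices_lst dim order_k order_l
instance (indices_lst : List (List Int)) (dim : Int) (order_k : Int) (order_l : Int) (out : List (List Int)) : Decidable (Spec_mat_indices_list indices_lst dim order_k order_l out) := by unfold Spec_mat_indices_list; infer_instance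

-- ===== CLAIM (what is proved, stated in full; the proofs are below) =====
def Claim_equal_mat_indices_list : Prop := ∀ (indices_lst : List (List Int)) (dim : Int) (order_k : Int) (order_l : Int), Dom_mat_indices_list indices_lst dim order_k order_l → Pre_mat_indices_list indices_lst dim order_k order_l → Spec_mat_indices_list indices_lst dim order_k order_l (mat_indices_list indices_lst dim order_k order_l)

-- ===== LEMMAS AND PROOFS =====

-- Horner with a nonzero seed: the seed is weighted by dim^length.
theorem horner_shift (ds : List Int) (dim a : Int) :
    ds.foldl (fun acc d => acc * dim + (d - 1)) a
      = a * dim ^ ds.length + ds.foldl (fun acc d => acc * dim + (d - 1)) 0 := by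
  induction ds generalizing a with
  | nil => simp
  | cons d ds ih =>
    simp only [List.foldl_cons, List.length_cons]
    rw [ih (a * dim + (d - 1)), ih (0 * dim + (d - 1))]
    ring

-- A's weighted fold, started with counter = length, equals the Horner accumulation.
theorem afold_eq_horner (ds : List Int) (dim t : Int) :
    (ds.foldl
      (fun (s : Int × Int) index => (s.1 + dim ^ (s.2 - 1).toNat * (index - 1), s.2 - 1))
      (t, (ds.length : Int))).1
      = t + hornerAcc ds dim := by
  induction ds generalizing t with
  | nil => simp [hornerAcc]
  | cons d ds ih =>
    have h1 : ((((d :: ds).length : Int)) - 1) = (ds.length : Int) := by simp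
    simp only [List.foldl_cons, h1]
    have h2 : ((ds.length : Int)).toNat = ds.length := Int.toNat_natCast _
    rw [h2, ih]
    simp only [hornerAcc, List.foldl_cons]
    rw [horner_shift ds dim (0 * dim + (d - 1))]
    ring

theorem conv_eq_horner (ds : List Int) (dim k : Int) (h : k = (ds.length : Int)) :
    convert_tuple_to_matrix_index ds dim k = hornerAcc ds dim := by
  subst h
  unfold convert_tuple_to_matrix_index
  rw [afold_eq_horner ds dim 0]
  exact zero_add _

-- A's append-accumulator loop is a map.
theorem foldl_app_map (f : List Int → List Int) (xs : List (List Int)) (acc : List (List Int)) :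
    xs.foldl (fun l t => l ++ [f t]) acc = acc ++ xs.map f := by
  induction xs generalizing acc with
  | nil => simp
  | cons x xs ih => simp [ih]

-- ===== VERDICT (by name: the statement is the Claim_ definition above) =====
theorem mat_indices_list_spec : Claim_equal_mat_indices_list := by
  intro indices_lst dim order_k order_l _ hpre
  obtain ⟨-, hk, hl, hlen⟩ := hpre
  unfold Spec_mat_indices_list mat_indices_list mat_indices_list_alt
  rw [foldl_app_map]
  simp only [List.nil_append]
  refine List.map_congr_left ?_
  intro t ht
  have hlt := hlen t ht
  have hrow : order_l = ((PySem.List.slice t none (some order_l)).length : Int) := by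
    rw [PySem.List.slice_to t hl]
    simp only [List.length_take]
    omega
  have hcol : order_k = ((PySem.List.slice t (some order_l) none).length : Int) := by
    rw [PySem.List.slice_from t hl]
    simp only [List.length_drop]
    omega
  rw [conv_eq_horner _ dim order_l hrow, conv_eq_horner _ dim order_k hcol]
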